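-- pv_equiv track=rewrite | github.com/Block-Bench/base | strategies/falseprophet/generate_false_prophet_v4.py | get_comment_block
-- ===== SOURCE A (Python) =====
-- def get_comment_block(lines: list, start_idx: int) -> str:
--     """Get full comment block starting from start_idx."""
--     block = []
--     for i in range(start_idx, len(lines)):
--         line = lines[i]
--         block.append(line)
--         if '*/' in line:
--             break
--     return '\n'.join(block)
-- ===== SOURCE B (Python) =====
-- def get_comment_block(lines: list, start_idx: int) -> str:
--     """Get full comment block starting from start_idx."""
--     n = len(lines)
--     end = next((i for i in range(start_idx, n) if '*/' in lines[i]), n - 1)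
--     return '\n'.join(lines[start_idx:end + 1])
-- ===== Notes on version B (the rewrite author's own statement) =====
-- stated objective: alternative
-- what changed: A accumulates lines one by one in a loop that breaks on '*/'; B first locates the end index of the block (first line from start_idx containing '*/', defaulting to the last line) and then extracts the whole block with one bulk slice lines[start_idx:end+1].
-- outside the precondition, e.g. on get_comment_block(['a'], -1): A returns 'a\na', B returns 'a'; on get_comment_block(['a'], -3): A raises IndexError, B raises IndexError
import Mathlib
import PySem

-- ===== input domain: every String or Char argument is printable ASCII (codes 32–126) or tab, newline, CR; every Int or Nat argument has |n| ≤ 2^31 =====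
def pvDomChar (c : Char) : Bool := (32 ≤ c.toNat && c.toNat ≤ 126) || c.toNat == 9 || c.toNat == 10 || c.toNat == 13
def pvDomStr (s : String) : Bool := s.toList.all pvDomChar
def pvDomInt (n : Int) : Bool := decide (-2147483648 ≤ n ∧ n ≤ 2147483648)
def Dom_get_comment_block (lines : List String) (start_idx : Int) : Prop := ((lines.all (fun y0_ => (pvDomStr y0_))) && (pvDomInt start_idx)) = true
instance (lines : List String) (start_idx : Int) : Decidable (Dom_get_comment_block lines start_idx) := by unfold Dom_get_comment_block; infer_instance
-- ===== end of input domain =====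

-- B replaces A's accumulate-and-break loop by a locate-the-end search followed by one bulk slice (objective: alternative decomposition, same cost).

-- ===== PORT A =====
-- A's loop: append lines[i] for i in range(start_idx, len(lines)), break on '*/'.
-- (pyGet? … |>.getD "" : in-range for every index the range produces with 0 ≤ start_idx, i.e. inside Pre_.)
def getCommentBlockLoopA (lines : List String) : List Int → List String → List String
  | [], block => block
  | i :: rest, block =>
    let line := (PySem.List.pyGet? lines i).getD ""
    let block := block ++ [line]
    if PySem.Str.isIn "*/" line then block
    else getCommentBlockLoopA lines rest block

def get_comment_block (lines : List String) (start_idx : Int) : String :=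
  PySem.Str.join "\n" (getCommentBlockLoopA lines (PySem.List.pyRange start_idx (lines.length : Int)) [])

-- ===== PORT B =====
-- B's end-locating pass: first i in range(start_idx, n) with '*/' in lines[i], default n-1.
def findEndIdxB (lines : List String) (dflt : Int) : List Int → Int
  | [] => dflt
  | i :: rest =>
    if PySem.Str.isIn "*/" ((PySem.List.pyGet? lines i).getD "") then i
    else findEndIdxB lines dflt rest

def get_comment_block_alt (lines : List String) (start_idx : Int) : String :=
  let n : Int := (lines.length : Int)
  let e := findEndIdxB lines (n - 1) (PySem.List.pyRange start_idx n)
  PySem.Str.join "\n" (PySem.List.slice lines (some start_idx) (some (e + 1)))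

-- ===== PRECONDITION & SPEC =====
-- Pre_ excludes negative start_idx: there A raises IndexError when start_idx < -len(lines), and for
-- -len(lines) <= start_idx < 0 both programs' values are accidents of Python's negative indexing/slicing
-- (A concatenates wrapped-around lines, B slices) — a corner no caller of a comment-block extractor specifies.
def Pre_get_comment_block (lines : List String) (start_idx : Int) : Prop := 0 ≤ start_idx
instance (lines : List String) (start_idx : Int) : Decidable (Pre_get_comment_block lines start_idx) := by unfold Pre_get_comment_block; infer_instance
def pvWitness_get_comment_block : List String × Int := (["/* a", " b", " c */", "after"], 0)
def Spec_get_comment_block (lines : List String) (start_idx : Int) (out : String) : Prop := out = get_comment_block_alt lines start_idx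
instance (lines : List String) (start_idx : Int) (out : String) : Decidable (Spec_get_comment_block lines start_idx out) := by unfold Spec_get_comment_block; infer_instance

-- ===== CLAIM (what is proved, stated in full; the proofs are below) =====
def Claim_equal_get_comment_block : Prop := ∀ (lines : List String) (start_idx : Int), Dom_get_comment_block lines start_idx → Pre_get_comment_block lines start_idx → Spec_get_comment_block lines start_idx (get_comment_block lines start_idx)

-- ===== LEMMAS AND PROOFS =====

-- the common specification: lines of the block from position k, terminator included
def blkSpec : List String → List String
  | [] => []
  | x :: xs => x :: (if PySem.Str.isIn "*/" x then [] else blkSpec xs)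

theorem loopA_eq_blkSpec (lines : List String) :
    ∀ (t : List String) (k : Nat) (acc : List String), t = lines.drop k →
      getCommentBlockLoopA lines (PySem.List.pyRange (k : Int) (lines.length : Int)) acc
        = acc ++ blkSpec t := by
  intro t
  induction t with
  | nil =>
    intro k acc ht
    have hk : lines.length ≤ k := by
      by_contra h
      push Not at h
      have := List.drop_eq_getElem_cons h
      rw [this] at ht; exact (List.cons_ne_nil _ _ ht.symm).elim
    rw [PySem.List.pyRange_one_eq_nil (by exact_mod_cast hk)]
    simp [getCommentBlockLoopA, blkSpec]
  | cons x xs ih =>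
    intro k acc ht
    have hk : k < lines.length := by
      by_contra h
      push Not at h
      rw [List.drop_eq_nil_of_le h] at ht; exact (List.cons_ne_nil _ _ ht).elim
    have hx : lines[k] = x := by
      have := List.drop_eq_getElem_cons hk
      rw [this] at ht; exact (List.cons.injEq _ _ _ _ ▸ ht).1.symm
    rw [PySem.List.pyRange_one_cons (by exact_mod_cast hk)]
    simp only [getCommentBlockLoopA, PySem.List.pyGet?_natCast, List.getElem?_eq_getElem hk, hx,
      Option.getD_some, PySem.Str.isIn_eq]
    rw [show ("*/" : String).toList = ['*', '/'] from rfl]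
    by_cases hp : PySem.Chars.isIn ['*', '/'] x.toList = true
    · simp [hp, blkSpec]
    · rw [if_neg hp]
      have hc : ((k : Int) + 1) = ((k + 1 : Nat) : Int) := by push_cast; ring
      have hxs : xs = lines.drop (k + 1) := by
        have h := List.drop_eq_getElem_cons hk
        rw [h, hx] at ht
        exact (List.cons.injEq _ _ _ _ ▸ ht).2
      rw [hc, ih (k + 1) (acc ++ [x]) hxs]
      simp [blkSpec, hp]

theorem findEndIdxB_cases (lines : List String) (d : Int) :
    ∀ r : List Int, findEndIdxB lines d r ∈ r ∨ findEndIdxB lines d r = d := by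
  intro r
  induction r with
  | nil => right; rfl
  | cons i rest ih =>
    simp only [findEndIdxB]
    split_ifs
    · left; exact List.mem_cons_self
    · rcases ih with h | h
      · left; exact List.mem_cons_of_mem _ h
      · right; exact h

theorem sliceB_eq_blkSpec (lines : List String) :
    ∀ (t : List String) (k : Nat), k ≤ lines.length → t = lines.drop k →
      PySem.List.slice lines (some (k : Int))
        (some (findEndIdxB lines ((lines.length : Int) - 1)
                 (PySem.List.pyRange (k : Int) (lines.length : Int)) + 1))
        = blkSpec t := by
  intro t
  induction t with
  | nil =>
    intro k hk ht
    have hk' : lines.length = k := by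
      by_contra h
      have hlt : k < lines.length := lt_of_le_of_ne hk (fun h' => h h'.symm)
      rw [List.drop_eq_getElem_cons hlt] at ht; exact (List.cons_ne_nil _ _ ht.symm).elim
    rw [PySem.List.pyRange_one_eq_nil (by omega)]
    simp only [findEndIdxB]
    have : (lines.length : Int) - 1 + 1 = ((lines.length : Nat) : Int) := by ring
    rw [this, PySem.List.slice_natCast]
    simp [blkSpec, hk', List.drop_eq_nil_of_le]
  | cons x xs ih =>
    intro k hk ht
    have hklt : k < lines.length := by
      by_contra h
      push Not at h
      rw [List.drop_eq_nil_of_le h] at ht; exact (List.cons_ne_nil _ _ ht).elim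
    have hx : lines[k] = x := by
      have := List.drop_eq_getElem_cons hklt
      rw [this] at ht; exact (List.cons.injEq _ _ _ _ ▸ ht).1.symm
    have hdrop : lines.drop k = x :: lines.drop (k + 1) := by
      rw [List.drop_eq_getElem_cons hklt, hx]
    rw [PySem.List.pyRange_one_cons (by exact_mod_cast hklt)]
    simp only [findEndIdxB, PySem.List.pyGet?_natCast, List.getElem?_eq_getElem hklt, hx,
      Option.getD_some, PySem.Str.isIn_eq]
    rw [show ("*/" : String).toList = ['*', '/'] from rfl]
    by_cases hp : PySem.Chars.isIn ['*', '/'] x.toList = true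
    · -- end is k itself; slice lines[k:k+1] = [x]
      rw [if_pos hp]
      have h1 : (k : Int) + 1 = (k : Int) + ((1 : Nat) : Int) := by norm_num
      rw [h1, PySem.List.slice_natCast_add]
      rw [hdrop]
      simp [blkSpec, hp]
    · rw [if_neg hp]
      set e := findEndIdxB lines ((lines.length : Int) - 1)
                 (PySem.List.pyRange ((k : Int) + 1) (lines.length : Int)) with he
      have hke : (k : Int) + 1 ≤ e + 1 := by
        rcases findEndIdxB_cases lines ((lines.length : Int) - 1)
            (PySem.List.pyRange ((k : Int) + 1) (lines.length : Int)) with h | h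
        · rw [← he] at h
          have := PySem.List.mem_pyRange_one.mp h
          omega
        · rw [← he] at h; omega
      have hcast : ((k : Int) + 1) = ((k + 1 : Nat) : Int) := by push_cast; ring
      have ihe : PySem.List.slice lines (some ((k + 1 : Nat) : Int)) (some (e + 1)) = blkSpec xs := by
        have := ih (k + 1) (by omega) (by rw [hdrop] at ht; exact (List.cons.injEq _ _ _ _ ▸ ht).2)
        rw [← hcast] at this ⊢
        exact this
      -- peel the head off the slice
      have h0k : (0 : Int) ≤ (k : Int) := by positivity
      have h0e : (0 : Int) ≤ e + 1 := by omega
      rw [PySem.List.slice_toNat lines h0k h0e]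
      rw [PySem.List.slice_toNat lines (by push_cast; omega) h0e] at ihe
      have hkn : ((k : Int)).toNat = k := by omega
      have hkn1 : (((k + 1 : Nat) : Int)).toNat = k + 1 := by omega
      rw [hkn, hdrop]
      rw [hkn1] at ihe
      have htn : (e + 1).toNat - k = ((e + 1).toNat - (k + 1)) + 1 := by omega
      rw [htn, List.take_succ_cons]
      rw [ihe]
      simp [blkSpec, hp]

-- ===== VERDICT (by name: the statement is the Claim_ definition above) =====
theorem get_comment_block_spec : Claim_equal_get_comment_block := by
  intro lines start_idx _hdom hpre
  unfold Spec_get_comment_block get_comment_block get_comment_block_alt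
  dsimp only
  have hs : start_idx = ((start_idx.toNat : Nat) : Int) := (Int.toNat_of_nonneg hpre).symm
  by_cases hbig : lines.length ≤ start_idx.toNat
  · -- start at or past the end: both produce the empty block
    rw [PySem.List.pyRange_one_eq_nil (by omega)]
    simp only [findEndIdxB, getCommentBlockLoopA]
    have h0e : (0 : Int) ≤ (lines.length : Int) - 1 + 1 := by omega
    rw [PySem.List.slice_toNat lines hpre h0e]
    rw [List.drop_eq_nil_of_le (by omega)]
    simp
  · push Not at hbig
    rw [hs]
    rw [loopA_eq_blkSpec lines (lines.drop start_idx.toNat) start_idx.toNat [] rfl]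
    rw [sliceB_eq_blkSpec lines (lines.drop start_idx.toNat) start_idx.toNat (le_of_lt hbig) rfl]
    simp
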